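-- pv_equiv track=rewrite | github.com/ht1204/repo_algoritmos | practica_parcial_2021-I/punto 1/punto 1.py | analizadorCifras
-- ===== SOURCE A (Python) =====
-- def analizadorCifras(numero):
--   numAux = numero
--
--   i, digitosPar, digitosImpar = 0,0,0
--
--   while(numAux > 0):
--     cifra = numAux % 10
--
--     if(i % 2 == 0):
--       digitosPar += cifra
--     else:
--       digitosImpar += cifra
--
--     numAux = numAux // 10
--     i += 1
--
--   if(digitosImpar == digitosPar):
--     return True
--
--   return False
-- ===== SOURCE B (Python) =====
-- def analizadorCifras(numero):
--   def alternante(n):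
--     # alternating sum of decimal digits, least-significant digit counted positive
--     return 0 if n <= 0 else n % 10 - alternante(n // 10)
--   return alternante(numero) == 0
-- ===== Notes on version B (the rewrite author's own statement) =====
-- stated objective: simpler
-- what changed: Replaces the while-loop with an index counter and two parity accumulators by a single recursion computing the alternating sum of the decimal digits and testing it for zero.
import Mathlib
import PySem

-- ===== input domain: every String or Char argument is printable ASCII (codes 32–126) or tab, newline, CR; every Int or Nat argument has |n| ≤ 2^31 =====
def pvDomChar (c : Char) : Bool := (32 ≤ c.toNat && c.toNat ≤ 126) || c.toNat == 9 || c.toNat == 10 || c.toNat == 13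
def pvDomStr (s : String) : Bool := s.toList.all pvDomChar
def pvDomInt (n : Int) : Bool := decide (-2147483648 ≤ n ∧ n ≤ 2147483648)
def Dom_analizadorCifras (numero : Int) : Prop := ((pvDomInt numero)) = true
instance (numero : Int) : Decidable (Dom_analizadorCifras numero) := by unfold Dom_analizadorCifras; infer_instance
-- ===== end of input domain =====

-- B replaces A's indexed while-loop with two parity accumulators by a recursive alternating digit sum (simpler).

-- termination helper for both recursions (cited by decreasing_by)
theorem pvFloordiv10_toNat_lt (n : Int) (h : 0 < n) :
    (PySem.Int.floordiv n 10).toNat < n.toNat := by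
  rw [PySem.Int.floordiv_eq_ediv_of_pos (by norm_num)]
  omega

-- ===== PORT A =====
def aLoop (numAux i digitosPar digitosImpar : Int) : Int × Int :=
  if h : numAux > 0 then
    let cifra := PySem.Int.mod numAux 10
    if PySem.Int.mod i 2 == 0 then
      aLoop (PySem.Int.floordiv numAux 10) (i + 1) (digitosPar + cifra) digitosImpar
    else
      aLoop (PySem.Int.floordiv numAux 10) (i + 1) digitosPar (digitosImpar + cifra)
  else
    (digitosPar, digitosImpar)
termination_by numAux.toNat
decreasing_by all_goals exact pvFloordiv10_toNat_lt numAux h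

def analizadorCifras (numero : Int) : Bool :=
  let r := aLoop numero 0 0 0
  if r.2 == r.1 then true else false

-- ===== PORT B =====
def alternante (n : Int) : Int :=
  if h : n ≤ 0 then 0
  else PySem.Int.mod n 10 - alternante (PySem.Int.floordiv n 10)
termination_by n.toNat
decreasing_by exact pvFloordiv10_toNat_lt n (by omega)

def analizadorCifras_alt (numero : Int) : Bool :=
  alternante numero == 0

-- ===== PRECONDITION & SPEC =====
def Spec_analizadorCifras (numero : Int) (out : Bool) : Prop := out = analizadorCifras_alt numero
instance (numero : Int) (out : Bool) : Decidable (Spec_analizadorCifras numero out) := by unfold Spec_analizadorCifras; infer_instance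

-- ===== CLAIM (what is proved, stated in full; the proofs are below) =====
def Claim_equal_analizadorCifras : Prop := ∀ (numero : Int), Dom_analizadorCifras numero → Spec_analizadorCifras numero (analizadorCifras numero)

-- ===== LEMMAS AND PROOFS =====

theorem alternante_nonpos (n : Int) (h : n ≤ 0) : alternante n = 0 := by
  rw [alternante]; simp [h]

theorem alternante_pos (n : Int) (h : 0 < n) :
    alternante n = PySem.Int.mod n 10 - alternante (PySem.Int.floordiv n 10) := by
  rw [alternante]; simp [Int.not_le.mpr h]

-- invariant: the loop's par − impar difference is the starting difference plus the
-- alternating digit sum, with sign given by the parity of the starting index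
theorem aLoop_diff_aux (k : Nat) : ∀ (n : Int), n.toNat ≤ k → ∀ (i p q : Int),
    (aLoop n i p q).1 - (aLoop n i p q).2 =
      p - q + (if PySem.Int.mod i 2 = 0 then alternante n else - alternante n) := by
  induction k with
  | zero =>
    intro n hn i p q
    rw [aLoop]
    have hn0 : ¬ n > 0 := by omega
    rw [dif_neg hn0]
    rw [alternante_nonpos n (by omega)]
    simp
  | succ k ih =>
    intro n hk i p q
    have ih' : ∀ (m : Int), m.toNat < n.toNat → ∀ (i p q : Int),
        (aLoop m i p q).1 - (aLoop m i p q).2 =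
          p - q + (if PySem.Int.mod i 2 = 0 then alternante m else - alternante m) := by
      intro m hm; exact ih m (by omega)
    by_cases hn : n > 0
    · have hm2 : PySem.Int.mod i 2 = i % 2 := PySem.Int.mod_eq_emod_of_pos (by norm_num)
      have hm2' : PySem.Int.mod (i + 1) 2 = (i + 1) % 2 :=
        PySem.Int.mod_eq_emod_of_pos (by norm_num)
      have halt := alternante_pos n hn
      have hrec := ih' (PySem.Int.floordiv n 10) (pvFloordiv10_toNat_lt n hn)
      by_cases hi : PySem.Int.mod i 2 = 0
      · rw [aLoop, dif_pos hn, if_pos (beq_iff_eq.mpr hi)]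
        rw [hrec (i + 1) (p + PySem.Int.mod n 10) q]
        have hodd : ¬ PySem.Int.mod (i + 1) 2 = 0 := by rw [hm2']; rw [hm2] at hi; omega
        rw [if_neg hodd, if_pos hi, halt]; ring
      · rw [aLoop, dif_pos hn, if_neg (by simp only [beq_iff_eq]; exact hi)]
        rw [hrec (i + 1) p (q + PySem.Int.mod n 10)]
        have heven : PySem.Int.mod (i + 1) 2 = 0 := by rw [hm2']; rw [hm2] at hi; omega
        rw [if_pos heven, if_neg hi, halt]; ring
    · rw [aLoop, dif_neg hn]
      rw [alternante_nonpos n (by omega)]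
      simp

-- ===== VERDICT (by name: the statement is the Claim_ definition above) =====
theorem analizadorCifras_spec : Claim_equal_analizadorCifras := by
  intro numero _
  unfold Spec_analizadorCifras analizadorCifras analizadorCifras_alt
  have h := aLoop_diff_aux numero.toNat numero le_rfl 0 0 0
  simp only [show PySem.Int.mod 0 2 = 0 from rfl, if_pos] at h
  by_cases hz : alternante numero = 0
  · simp only [hz, beq_iff_eq] at *
    have : (aLoop numero 0 0 0).2 = (aLoop numero 0 0 0).1 := by omega
    simp [this]
  · have : (aLoop numero 0 0 0).2 ≠ (aLoop numero 0 0 0).1 := by omega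
    simp [this, hz]
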